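-- pv_equiv track=rewrite | github.com/nkngn/mv-visualizer | src/mv_lineage/graph.py | build_nodes_edges
-- ===== SOURCE A (Python) =====
-- from typing import Iterable
--
-- def build_nodes_edges(records: Iterable[dict[str, str]]) -> tuple[set[str], set[tuple[str, str]]]:
--     nodes: set[str] = set()
--     edges: set[tuple[str, str]] = set()
--     for record in records:
--         source = record["source"]
--         mv = record["mv"]
--         target = record["target"]
--         nodes.update({source, mv, target})
--         edges.add((source, mv))
--         edges.add((mv, target))
--     return nodes, edges
-- ===== SOURCE B (Python) =====
-- def build_nodes_edges(records):
--     recs = list(records)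
--     if len(recs) == 0:
--         return set(), set()
--     if len(recs) == 1:
--         r = recs[0]
--         return ({r["source"], r["mv"], r["target"]},
--                 {(r["source"], r["mv"]), (r["mv"], r["target"])})
--     mid = len(recs) // 2
--     left_nodes, left_edges = build_nodes_edges(recs[:mid])
--     right_nodes, right_edges = build_nodes_edges(recs[mid:])
--     return left_nodes | right_nodes, left_edges | right_edges
-- ===== Notes on version B (the rewrite author's own statement) =====
-- stated objective: alternative
-- what changed: B replaces A's single linear pass with set accumulators by a divide-and-conquer recursion: a one-record base case yields its literal node/edge sets and halves are combined with set union; correct because set union is associative, so any splitting of the record list yields the same sets.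
import Mathlib
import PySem

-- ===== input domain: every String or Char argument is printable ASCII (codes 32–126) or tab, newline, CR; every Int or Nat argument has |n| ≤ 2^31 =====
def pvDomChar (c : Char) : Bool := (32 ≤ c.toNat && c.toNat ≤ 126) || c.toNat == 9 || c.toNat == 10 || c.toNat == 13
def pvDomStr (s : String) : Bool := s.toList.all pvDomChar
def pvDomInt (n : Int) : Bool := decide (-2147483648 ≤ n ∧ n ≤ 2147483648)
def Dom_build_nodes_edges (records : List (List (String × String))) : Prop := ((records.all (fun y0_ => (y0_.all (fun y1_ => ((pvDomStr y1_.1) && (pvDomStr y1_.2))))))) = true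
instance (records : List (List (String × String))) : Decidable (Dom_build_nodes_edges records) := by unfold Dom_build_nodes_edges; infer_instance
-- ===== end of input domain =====

-- ===== PORT A =====
-- B replaces A's single accumulating pass by a divide-and-conquer recursion merging halves with set union (alternative decomposition; same results).
-- record["k"] is ported as first-match lookup with default "" — exact only under Pre_ (KeyError excluded there).
def pvGet (record : List (String × String)) (k : String) : String :=
  ((PySem.Dict.mk record).get? k).getD ""

def build_nodes_edges (records : List (List (String × String))) : List String × (List (String × String)) :=
  records.foldl
    (fun st record =>
      let source := pvGet record "source"
      let mv := pvGet record "mv"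
      let target := pvGet record "target"
      (PySem.Set.update st.1 (PySem.Set.ofList [source, mv, target]),
       PySem.Set.add (PySem.Set.add st.2 (source, mv)) (mv, target)))
    (PySem.Set.empty, PySem.Set.empty)

-- ===== PORT B =====
-- recs[0] → headI (safe: length = 1 there); recs[:mid] / recs[mid:] with 0 ≤ mid ≤ len are exactly take/drop.
def build_nodes_edges_alt (records : List (List (String × String))) : List String × (List (String × String)) :=
  if h0 : records.length = 0 then (PySem.Set.empty, PySem.Set.empty)
  else if h1 : records.length = 1 then
    let r := records.headI
    (PySem.Set.ofList [pvGet r "source", pvGet r "mv", pvGet r "target"],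
     PySem.Set.ofList [(pvGet r "source", pvGet r "mv"), (pvGet r "mv", pvGet r "target")])
  else
    let mid := records.length / 2
    let lft := build_nodes_edges_alt (records.take mid)
    let rgt := build_nodes_edges_alt (records.drop mid)
    (PySem.Set.union lft.1 rgt.1, PySem.Set.union lft.2 rgt.2)
termination_by records.length
decreasing_by
  · simp only [List.length_take]; omega
  · simp only [List.length_drop]; omega

-- ===== PRECONDITION & SPEC =====
-- Pre_: every record carries the keys "source", "mv" and "target"; on any other input both Pythons raise KeyError.
def Pre_build_nodes_edges (records : List (List (String × String))) : Prop :=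
  (records.all (fun r =>
    (PySem.Dict.mk r).contains "source" && (PySem.Dict.mk r).contains "mv" &&
      (PySem.Dict.mk r).contains "target")) = true
instance (records : List (List (String × String))) : Decidable (Pre_build_nodes_edges records) := by
  unfold Pre_build_nodes_edges; infer_instance

def pvWitness_build_nodes_edges : (List (List (String × String))) :=
  [[("source", "a"), ("mv", "b"), ("target", "c")]]

def Spec_build_nodes_edges (records : List (List (String × String))) (out : List String × (List (String × String))) : Prop := out = build_nodes_edges_alt records
instance (records : List (List (String × String))) (out : List String × (List (String × String))) : Decidable (Spec_build_nodes_edges records out) := by unfold Spec_build_nodes_edges; infer_instance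

-- ===== CLAIM (what is proved, stated in full; the proofs are below) =====
def Claim_equal_build_nodes_edges : Prop := ∀ (records : List (List (String × String))), Dom_build_nodes_edges records → Pre_build_nodes_edges records → Spec_build_nodes_edges records (build_nodes_edges records)

-- ===== LEMMAS AND PROOFS =====

def nFlat (recs : List (List (String × String))) : List String :=
  recs.flatMap (fun r => [pvGet r "source", pvGet r "mv", pvGet r "target"])

def eFlat (recs : List (List (String × String))) : List (String × String) :=
  recs.flatMap (fun r => [(pvGet r "source", pvGet r "mv"), (pvGet r "mv", pvGet r "target")])

lemma update_ofList_right {α : Type} [BEq α] [LawfulBEq α] (s : PySem.Set α) (xs : List α) :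
    PySem.Set.update s (PySem.Set.ofList xs) = PySem.Set.update s xs := by
  rw [PySem.Set.update_eq_append_filter, PySem.Set.update_eq_append_filter,
    PySem.Set.ofList_ofList]

lemma a_fold_eq (l : List (List (String × String))) (N : List String)
    (E : List (String × String)) :
    l.foldl
      (fun st record =>
        let source := pvGet record "source"
        let mv := pvGet record "mv"
        let target := pvGet record "target"
        (PySem.Set.update st.1 (PySem.Set.ofList [source, mv, target]),
         PySem.Set.add (PySem.Set.add st.2 (source, mv)) (mv, target)))
      (PySem.Set.ofList N, PySem.Set.ofList E)
    = (PySem.Set.ofList (N ++ nFlat l), PySem.Set.ofList (E ++ eFlat l)) := by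
  induction l generalizing N E with
  | nil => simp [nFlat, eFlat]
  | cons r l ih =>
    simp only [List.foldl_cons]
    have hn : PySem.Set.update (PySem.Set.ofList N)
        (PySem.Set.ofList [pvGet r "source", pvGet r "mv", pvGet r "target"]) =
        PySem.Set.ofList (N ++ [pvGet r "source", pvGet r "mv", pvGet r "target"]) := by
      rw [update_ofList_right, PySem.Set.ofList_append]
    have he : PySem.Set.add (PySem.Set.add (PySem.Set.ofList E)
          (pvGet r "source", pvGet r "mv")) (pvGet r "mv", pvGet r "target") =
        PySem.Set.ofList (E ++ [(pvGet r "source", pvGet r "mv"),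
          (pvGet r "mv", pvGet r "target")]) := by
      rw [show E ++ [(pvGet r "source", pvGet r "mv"), (pvGet r "mv", pvGet r "target")]
            = (E ++ [(pvGet r "source", pvGet r "mv")]) ++ [(pvGet r "mv", pvGet r "target")] by
          simp,
        PySem.Set.ofList_append_singleton, PySem.Set.ofList_append_singleton]
    rw [hn, he, ih]
    simp [nFlat, eFlat]

lemma a_eq (recs : List (List (String × String))) :
    build_nodes_edges recs = (PySem.Set.ofList (nFlat recs), PySem.Set.ofList (eFlat recs)) := by
  have h := a_fold_eq recs [] []
  simpa [build_nodes_edges, PySem.Set.empty, PySem.Set.ofList] using h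

lemma union_ofList (xs ys : List String) :
    PySem.Set.union (PySem.Set.ofList xs) (PySem.Set.ofList ys) =
      PySem.Set.ofList (xs ++ ys) := by
  rw [PySem.Set.ofList_append, PySem.Set.union, update_ofList_right]

lemma union_ofList_pair (xs ys : List (String × String)) :
    PySem.Set.union (PySem.Set.ofList xs) (PySem.Set.ofList ys) =
      PySem.Set.ofList (xs ++ ys) := by
  rw [PySem.Set.ofList_append, PySem.Set.union, update_ofList_right]

lemma b_eq (recs : List (List (String × String))) :
    build_nodes_edges_alt recs =
      (PySem.Set.ofList (nFlat recs), PySem.Set.ofList (eFlat recs)) := by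
  induction recs using build_nodes_edges_alt.induct with
  | case1 recs h0 =>
    rw [build_nodes_edges_alt]
    rw [dif_pos h0]
    rw [List.length_eq_zero_iff.mp h0]
    rfl
  | case2 recs h0 h1 =>
    obtain ⟨r, rfl⟩ := List.length_eq_one_iff.mp h1
    rw [build_nodes_edges_alt]
    rw [dif_neg h0, dif_pos h1]
    simp [nFlat, eFlat, List.headI]
  | case3 recs h0 h1 mid ih1 ih2 =>
    rw [build_nodes_edges_alt]
    rw [dif_neg h0, dif_neg h1]
    show (PySem.Set.union (build_nodes_edges_alt (List.take mid recs)).1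
            (build_nodes_edges_alt (List.drop mid recs)).1,
          PySem.Set.union (build_nodes_edges_alt (List.take mid recs)).2
            (build_nodes_edges_alt (List.drop mid recs)).2)
        = (PySem.Set.ofList (nFlat recs), PySem.Set.ofList (eFlat recs))
    rw [ih1, ih2]
    rw [union_ofList, union_ofList_pair]
    rw [show nFlat (recs.take mid) ++ nFlat (recs.drop mid)
          = nFlat recs by simp [nFlat, ← List.flatMap_append],
        show eFlat (recs.take mid) ++ eFlat (recs.drop mid)
          = eFlat recs by simp [eFlat, ← List.flatMap_append]]

-- ===== VERDICT (by name: the statement is the Claim_ definition above) =====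
theorem build_nodes_edges_spec : Claim_equal_build_nodes_edges := by
  intro records _ _
  unfold Spec_build_nodes_edges
  rw [a_eq, b_eq]
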